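-- pv_equiv track=rewrite | github.com/ishtiq10001/CPS109_Assignments | assignment 2/PythonProblems-main/a2_109_sub.py | remove_after_kth
-- ===== SOURCE A (Python) =====
-- def remove_after_kth(items,k):#question 45
--     item_dict = {}
--     r_list = []
--     counter = 0
--     for i in items:
--         if i in item_dict:
--             counter = item_dict[i]
--             counter +=1
--             item_dict[i] = counter
--             if counter <= k:
--                 r_list.append(i)
--
--         else:
--
--             item_dict[i] = 1
--             counter = item_dict[i]
--             if counter <= k:
--                 r_list.append(i)
--     return(r_list)
-- ===== SOURCE B (Python) =====
-- def remove_after_kth(items, k):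
--     groups = {}
--     for i, x in enumerate(items):
--         groups.setdefault(x, []).append((i, x))
--     kept = []
--     for pairs in groups.values():
--         kept.extend(pairs[:max(k, 0)])
--     kept.sort(key=lambda p: p[0])
--     return [x for _, x in kept]
-- ===== Notes on version B (the rewrite author's own statement) =====
-- stated objective: alternative
-- what changed: Instead of A's single streaming pass with a running count dictionary, B groups the positions of each value, keeps only the first k positions per group, and merges the kept (position, value) pairs back into input order by sorting on position.
import Mathlib
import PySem

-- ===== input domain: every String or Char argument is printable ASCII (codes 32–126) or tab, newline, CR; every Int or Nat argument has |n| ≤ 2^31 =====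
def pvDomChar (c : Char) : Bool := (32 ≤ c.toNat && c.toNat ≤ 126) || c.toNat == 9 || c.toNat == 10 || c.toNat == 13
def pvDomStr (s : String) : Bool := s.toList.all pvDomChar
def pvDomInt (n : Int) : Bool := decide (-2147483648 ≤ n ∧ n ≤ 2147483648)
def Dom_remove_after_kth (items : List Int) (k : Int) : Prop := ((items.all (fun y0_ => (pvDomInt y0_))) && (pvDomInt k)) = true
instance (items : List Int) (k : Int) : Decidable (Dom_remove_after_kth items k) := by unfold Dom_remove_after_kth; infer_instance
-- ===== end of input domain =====

-- One honest line: B replaces A's streaming pass with a running count-dictionary by a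
-- group-by-value / take-first-k-per-group / merge-by-position algorithm; objective: alternative.

-- ===== PORT A =====
def remove_after_kth (items : List Int) (k : Int) : List Int :=
  -- state: (item_dict, r_list); Python's `counter` is recomputed per iteration
  (items.foldl (fun (st : PySem.Dict Int Int × List Int) i =>
      match st.1.get? i with
      | some c =>
          let counter := c + 1
          let d := st.1.insert i counter
          (d, if counter ≤ k then st.2 ++ [i] else st.2)
      | none =>
          let d := st.1.insert i 1
          let counter := (1 : Int)
          (d, if counter ≤ k then st.2 ++ [i] else st.2))
    (PySem.Dict.empty, [])).2

-- ===== PORT B =====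
def remove_after_kth_alt (items : List Int) (k : Int) : List Int :=
  -- groups : value -> list of its (position, value) pairs, in order of appearance
  let groups : PySem.Dict Int (List (Int × Int)) :=
    (PySem.List.enumerate items).foldl
      (fun d q => d.modify q.2 [] (fun l => l ++ [q])) PySem.Dict.empty
  -- first max(k,0) pairs of each group, concatenated over the dict's value lists
  let kept := groups.values.foldl
      (fun acc pairs => acc ++ PySem.List.slice pairs none (some (max k 0))) []
  -- merge back into input order by sorting on position, then drop the positions
  (PySem.List.sorted kept (fun p => p.1)).map (fun p => p.2)

-- ===== PRECONDITION & SPEC =====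
def Spec_remove_after_kth (items : List Int) (k : Int) (out : List Int) : Prop := out = remove_after_kth_alt items k
instance (items : List Int) (k : Int) (out : List Int) : Decidable (Spec_remove_after_kth items k out) := by unfold Spec_remove_after_kth; infer_instance

-- ===== CLAIM (what is proved, stated in full; the proofs are below) =====
def Claim_equal_remove_after_kth : Prop := ∀ (items : List Int) (k : Int), Dom_remove_after_kth items k → Spec_remove_after_kth items k (remove_after_kth items k)

-- ===== LEMMAS AND PROOFS =====

-- The common reference function: keep x (after already-seen prefix p) iff p holds fewer than k copies of x.
def keepF (k : Int) : List Int → List Int → List Int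
  | _, [] => []
  | p, x :: xs => (if (p.count x : Int) < k then [x] else []) ++ keepF k (p ++ [x]) xs

-- ---------- A = keepF ----------

-- A's dict after processing prefix p maps each x in p to its count in p.
def AInv (d : PySem.Dict Int Int) (p : List Int) : Prop :=
  ∀ x : Int, d.get? x = if x ∈ p then some (p.count x : Int) else none

theorem AInv_step (d : PySem.Dict Int Int) (p : List Int) (x : Int) (h : AInv d p) :
    AInv (d.insert x ((p.count x : Int) + 1)) (p ++ [x]) := by
  intro y
  rw [PySem.Dict.get?_insert]
  by_cases hyx : y = x
  · subst hyx
    simp [List.count_append]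
  · rw [if_neg hyx, h y]
    simp [List.count_append, List.mem_append, hyx, Ne.symm hyx]

theorem A_loop (k : Int) (rest : List Int) :
    ∀ (d : PySem.Dict Int Int) (p r : List Int), AInv d p →
    ((rest.foldl (fun (st : PySem.Dict Int Int × List Int) i =>
        match st.1.get? i with
        | some c =>
            let counter := c + 1
            let d := st.1.insert i counter
            (d, if counter ≤ k then st.2 ++ [i] else st.2)
        | none =>
            let d := st.1.insert i 1
            let counter := (1 : Int)
            (d, if counter ≤ k then st.2 ++ [i] else st.2))
      (d, r)).2)
    = r ++ keepF k p rest := by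
  induction rest with
  | nil => intro d p r _; simp [keepF]
  | cons x xs ih =>
    intro d p r hinv
    simp only [List.foldl_cons]
    by_cases hx : x ∈ p
    · have hd : d.get? x = some (p.count x : Int) := by rw [hinv x, if_pos hx]
      rw [hd]
      dsimp only
      have hcond : ((p.count x : Int) + 1 ≤ k) ↔ ((p.count x : Int) < k) := by omega
      rw [ih _ _ _ (AInv_step d p x hinv), keepF]
      by_cases hk : (p.count x : Int) < k
      · rw [if_pos (hcond.mpr hk), if_pos hk]; simp
      · rw [if_neg (fun h => hk (hcond.mp h)), if_neg hk]; simp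
    · have hd : d.get? x = none := by rw [hinv x, if_neg hx]
      have hc : p.count x = 0 := List.count_eq_zero.mpr hx
      rw [hd]
      dsimp only
      have hins : d.insert x (1 : Int) = d.insert x ((p.count x : Int) + 1) := by
        rw [hc]; norm_num
      rw [hins, ih _ _ _ (AInv_step d p x hinv), keepF, hc]
      by_cases hk : (0 : Int) < k
      · rw [if_pos (by omega : (1:Int) ≤ k)]; simp [hk]
      · rw [if_neg (by omega : ¬ (1:Int) ≤ k)]; simp [hk]

theorem A_eq_keepF (items : List Int) (k : Int) :
    remove_after_kth items k = keepF k [] items := by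
  unfold remove_after_kth
  exact A_loop k items PySem.Dict.empty [] [] (fun x => by simp [PySem.Dict.get?_empty])

-- ---------- B = keepF ----------

-- the group of value v: all enumerate entries carrying v
theorem groups_getD (items : List Int) (v : Int) :
    (((PySem.List.enumerate items).foldl
        (fun d q => d.modify q.2 [] (fun l => l ++ [q])) PySem.Dict.empty).getD v [])
    = (PySem.List.enumerate items).filter (fun q => q.2 == v) := by
  have h1 : (PySem.List.enumerate items).foldl
        (fun d q => d.modify q.2 [] (fun l => l ++ [q])) PySem.Dict.empty
      = ((PySem.List.enumerate items).map (fun q => (q.2, q))).foldl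
        (fun d p => d.modify p.1 [] (fun l => l ++ [p.2])) PySem.Dict.empty := by
    rw [List.foldl_map]
  rw [h1, PySem.Dict.getD_foldl_modify_append]
  rw [List.filter_map]
  simp [Function.comp_def]

theorem groups_keys (items : List Int) :
    (((PySem.List.enumerate items).foldl
        (fun d q => d.modify q.2 [] (fun l => l ++ [q])) PySem.Dict.empty).keys)
    = PySem.Set.ofList items := by
  rw [PySem.Dict.keys_foldl_modify_key (PySem.List.enumerate items) (fun q => q.2) []
        (fun _ q => fun l => l ++ [q]) PySem.Dict.empty]
  rw [PySem.List.map_snd_enumerate]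
  rfl

theorem groups_keys_nodup (items : List Int) :
    (((PySem.List.enumerate items).foldl
        (fun d q => d.modify q.2 [] (fun l => l ++ [q])) PySem.Dict.empty).keys).Nodup := by
  exact PySem.Dict.nodup_keys_foldl_modify_key (PySem.List.enumerate items) (fun q => q.2) []
        (fun _ q => fun l => l ++ [q]) PySem.Dict.empty (by simp [PySem.Dict.empty, PySem.Dict.keys])

-- enumerate entries have pairwise-distinct, hence nodup, entries
theorem enumerate_nodup (items : List Int) (s : Int) : (PySem.List.enumerate items s).Nodup :=
  (PySem.List.pairwise_lt_enumerate items s).imp (fun h => by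
    intro he; subst he; exact lt_irrefl _ h)

-- membership in take K of a list sorted strictly by .1
theorem mem_take_iff_countP (q : Int × Int) :
    ∀ (l : List (Int × Int)) (K : Nat), l.Pairwise (fun a b => a.1 < b.1) → q ∈ l →
    (q ∈ l.take K ↔ l.countP (fun r => decide (r.1 < q.1)) < K) := by
  intro l
  induction l with
  | nil => intro K _ hq; cases hq
  | cons a t ih =>
    intro K hp hq
    rcases List.mem_cons.mp hq with rfl | hqt
    · -- q is the head: no element of q :: t is < q.1
      have hcnt : (q :: t).countP (fun r => decide (r.1 < q.1)) = 0 := by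
        apply List.countP_eq_zero.mpr
        intro r hr
        rcases List.mem_cons.mp hr with rfl | hrt
        · simp
        · have := (List.pairwise_cons.mp hp).1 r hrt
          simp; omega
      rw [hcnt]
      cases K with
      | zero => simp
      | succ K' => simp
    · have halt : a.1 < q.1 := (List.pairwise_cons.mp hp).1 q hqt
      have hcnt : (a :: t).countP (fun r => decide (r.1 < q.1))
          = t.countP (fun r => decide (r.1 < q.1)) + 1 := by
        rw [List.countP_cons]; simp [halt]
      rw [hcnt]
      cases K with
      | zero => simp
      | succ K' =>
        have hih := ih K' (List.pairwise_cons.mp hp).2 hqt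
        have hne : q ≠ a := by intro he; subst he; exact lt_irrefl _ halt
        simp only [List.take_succ_cons, List.mem_cons, hne, false_or]
        rw [hih]; omega

-- counting earlier occurrences through enumerate
theorem countP_enumerate_zero (x : Int) :
    ∀ (t : List Int) (s b : Int), b ≤ s →
    (PySem.List.enumerate t s).countP (fun r => r.2 == x && decide (r.1 < b)) = 0 := by
  intro t s b hbs
  apply List.countP_eq_zero.mpr
  intro r hr
  rcases (PySem.List.mem_enumerate_iff t s r).mp hr with ⟨j, hj, rfl⟩
  simp; intro _; omega

theorem countP_enumerate (x : Int) :
    ∀ (t : List Int) (s : Int) (j : Nat),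
    (PySem.List.enumerate t s).countP (fun r => r.2 == x && decide (r.1 < s + (j : Int)))
      = (t.take j).count x := by
  intro t
  induction t with
  | nil => intro s j; simp [PySem.List.enumerate]
  | cons y ys ih =>
    intro s j
    rw [PySem.List.enumerate_cons, List.countP_cons]
    cases j with
    | zero =>
      rw [countP_enumerate_zero x ys (s+1) (s + (0:Nat)) (by omega)]
      simp
    | succ j' =>
      have hpred : (PySem.List.enumerate ys (s+1)).countP
            (fun r => r.2 == x && decide (r.1 < s + ((j'+1 : Nat) : Int)))
          = (PySem.List.enumerate ys (s+1)).countP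
            (fun r => r.2 == x && decide (r.1 < (s+1) + ((j' : Nat) : Int))) := by
        apply List.countP_congr
        intro r _
        simp only [Bool.and_eq_true, decide_eq_true_eq]
        constructor
        · rintro ⟨h1, h2⟩; exact ⟨h1, by push_cast at h2 ⊢; omega⟩
        · rintro ⟨h1, h2⟩; exact ⟨h1, by push_cast at h2 ⊢; omega⟩
      rw [hpred, ih (s+1) j']
      simp only [List.take_succ_cons, List.count_cons]
      by_cases hyx : y = x
      · subst hyx; simp
      · simp [hyx]

-- the filtered enumerate list: entries whose value occurred < k times before them
def flKeep (items : List Int) (k : Int) : List (Int × Int) :=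
  (PySem.List.enumerate items).filter
    (fun q => decide (((items.take q.1.toNat).count q.2 : Int) < k))

theorem countP_block (items : List Int) (q : Int × Int) (j : Nat) (hj : j < items.length)
    (hq : q = ((j : Int), items[j])) :
    ((PySem.List.enumerate items).filter (fun r => r.2 == q.2)).countP
        (fun r => decide (r.1 < q.1))
      = (items.take j).count q.2 := by
  rw [List.countP_filter]
  have hcg : (PySem.List.enumerate items).countP
        (fun r => decide (r.1 < q.1) && (r.2 == q.2))
      = (PySem.List.enumerate items).countP
        (fun r => r.2 == q.2 && decide (r.1 < 0 + (j : Int))) := by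
    apply List.countP_congr
    intro r _
    subst hq
    simp only [Bool.and_eq_true, decide_eq_true_eq]
    constructor
    · rintro ⟨h1, h2⟩; exact ⟨h2, by omega⟩
    · rintro ⟨h1, h2⟩; exact ⟨by omega, h1⟩
  rw [hcg, countP_enumerate q.2 items 0 j]

theorem mem_block_iff (items : List Int) (k : Int) (v : Int) (q : Int × Int) :
    (q ∈ ((PySem.List.enumerate items).filter (fun r => r.2 == v)).take (max k 0).toNat)
    ↔ (q.2 = v ∧ q ∈ flKeep items k) := by
  have hpair : ((PySem.List.enumerate items).filter (fun r => r.2 == v)).Pairwise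
      (fun a b => a.1 < b.1) :=
    List.Pairwise.sublist List.filter_sublist (PySem.List.pairwise_lt_enumerate items 0)
  constructor
  · intro hq
    have hmem : q ∈ (PySem.List.enumerate items).filter (fun r => r.2 == v) :=
      List.mem_of_mem_take hq
    have hqv : q.2 = v := by
      have := (List.mem_filter.mp hmem).2; simpa using this
    have hE : q ∈ PySem.List.enumerate items := (List.mem_filter.mp hmem).1
    rcases (PySem.List.mem_enumerate_iff items 0 q).mp hE with ⟨j, hj, hq0⟩
    have hq' : q = ((j : Int), items[j]) := by rw [hq0]; norm_num
    have hcnt := (mem_take_iff_countP q _ (max k 0).toNat hpair hmem).mp hq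
    subst hqv
    rw [countP_block items q j hj hq'] at hcnt
    refine ⟨rfl, List.mem_filter.mpr ⟨hE, ?_⟩⟩
    have hjq : q.1.toNat = j := by rw [hq']; exact Int.toNat_natCast j
    rw [hjq]
    simp only [decide_eq_true_eq]
    omega
  · rintro ⟨hqv, hfl⟩
    have hE : q ∈ PySem.List.enumerate items := (List.mem_filter.mp hfl).1
    have hk : ((items.take q.1.toNat).count q.2 : Int) < k := by
      have := (List.mem_filter.mp hfl).2; simpa using this
    rcases (PySem.List.mem_enumerate_iff items 0 q).mp hE with ⟨j, hj, hq0⟩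
    have hq' : q = ((j : Int), items[j]) := by rw [hq0]; norm_num
    have hmem : q ∈ (PySem.List.enumerate items).filter (fun r => r.2 == v) :=
      List.mem_filter.mpr ⟨hE, by simp [hqv]⟩
    apply (mem_take_iff_countP q _ (max k 0).toNat hpair hmem).mpr
    subst hqv
    rw [countP_block items q j hj hq']
    have hjq : q.1.toNat = j := by rw [hq']; exact Int.toNat_natCast j
    rw [hjq] at hk
    omega

theorem flKeep_nodup (items : List Int) (k : Int) : (flKeep items k).Nodup :=
  (List.filter_sublist).nodup (enumerate_nodup items 0)

theorem flKeep_pairwise (items : List Int) (k : Int) :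
    (flKeep items k).Pairwise (fun a b => a.1 < b.1) :=
  List.Pairwise.sublist List.filter_sublist (PySem.List.pairwise_lt_enumerate items 0)

-- the concatenated kept blocks are a permutation of flKeep
theorem kept_perm (items : List Int) (k : Int) :
    (flKeep items k).Perm
      ((PySem.Set.ofList items).flatMap
        (fun v => ((PySem.List.enumerate items).filter (fun r => r.2 == v)).take (max k 0).toNat)) := by
  have hnd2 : ((PySem.Set.ofList items).flatMap
      (fun v => ((PySem.List.enumerate items).filter (fun r => r.2 == v)).take (max k 0).toNat)).Nodup := by
    apply List.nodup_flatMap.mpr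
    constructor
    · intro v _
      exact ((List.take_sublist _ _).trans List.filter_sublist).nodup (enumerate_nodup items 0)
    · apply (PySem.Set.nodup_ofList items).imp
      intro v w hvw r hrv hrw
      have h1 := ((mem_block_iff items k v r).mp hrv).1
      have h2 := ((mem_block_iff items k w r).mp hrw).1
      exact hvw (h1 ▸ h2)
  apply (List.perm_ext_iff_of_nodup (flKeep_nodup items k) hnd2).mpr
  intro a
  rw [List.mem_flatMap]
  constructor
  · intro ha
    refine ⟨a.2, ?_, (mem_block_iff items k a.2 a).mpr ⟨rfl, ha⟩⟩
    have hE : a ∈ PySem.List.enumerate items := (List.mem_filter.mp ha).1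
    rcases (PySem.List.mem_enumerate_iff items 0 a).mp hE with ⟨j, hj, rfl⟩
    exact (PySem.Set.mem_ofList items _).mpr (List.getElem_mem hj)
  · rintro ⟨v, _, hb⟩
    exact ((mem_block_iff items k v a).mp hb).2

-- map-snd of the filtered enumerate IS keepF
theorem filter_enumerate_keepF (k : Int) :
    ∀ (rest p : List Int),
    ((PySem.List.enumerate rest ((p.length : Nat) : Int)).filter
        (fun q => decide ((((p ++ rest).take q.1.toNat).count q.2 : Int) < k))).map (fun q => q.2)
      = keepF k p rest := by
  intro rest
  induction rest with
  | nil => intro p; simp [keepF, PySem.List.enumerate]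
  | cons x xs ih =>
    intro p
    have hsplit : p ++ x :: xs = (p ++ [x]) ++ xs := by simp
    have htail : ((PySem.List.enumerate xs (((p.length : Nat) : Int) + 1)).filter
        (fun q => decide ((((p ++ x :: xs).take q.1.toNat).count q.2 : Int) < k))).map (fun q => q.2)
        = keepF k (p ++ [x]) xs := by
      have h1 : ((p.length : Nat) : Int) + 1 = (((p ++ [x]).length : Nat) : Int) := by
        simp
      simp only [hsplit, h1]
      exact ih (p ++ [x])
    rw [PySem.List.enumerate_cons, List.filter_cons]
    have hcount : List.take p.length (p ++ x :: xs) = p := by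
      rw [hsplit, List.append_assoc, List.take_left]
    by_cases hk : (p.count x : Int) < k
    · rw [if_pos (by simp [hcount, hk])]
      simp only [List.map_cons, htail, keepF]
      simp [hk]
    · rw [if_neg (by simp [hcount, hk])]
      rw [htail, keepF]
      simp [hk]

theorem B_eq_keepF (items : List Int) (k : Int) :
    remove_after_kth_alt items k = keepF k [] items := by
  simp only [remove_after_kth_alt]
  have hvals : (((PySem.List.enumerate items).foldl
        (fun d q => d.modify q.2 [] (fun l => l ++ [q])) PySem.Dict.empty).values)
      = (PySem.Set.ofList items).map
          (fun v => (PySem.List.enumerate items).filter (fun r => r.2 == v)) := by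
    rw [PySem.Dict.values_eq_map_keys _ (groups_keys_nodup items) []]
    rw [groups_keys]
    simp only [groups_getD]
  rw [hvals, PySem.List.foldl_append_eq_flatMap, List.flatMap_map, List.nil_append]
  simp only [PySem.List.slice_to _ (le_max_right k 0)]
  rw [PySem.List.sorted_eq_of_perm_of_pairwise_lt _ (flKeep items k) (fun p => p.1)
        (kept_perm items k) (flKeep_pairwise items k)]
  have := filter_enumerate_keepF k items []
  simpa [flKeep] using this

-- ===== VERDICT (by name: the statement is the Claim_ definition above) =====
theorem remove_after_kth_spec : Claim_equal_remove_after_kth := by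
  intro items k _
  unfold Spec_remove_after_kth
  rw [A_eq_keepF, B_eq_keepF]
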